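-- pv_equiv track=rewrite | github.com/brittonhw/advent_of_code | 2024/day2/day2p1.py | check_desc_dampener_dynamic
-- ===== SOURCE A (Python) =====
-- def safely_desc(a, b):
--     return (a - b) in [1, 2, 3]
--
-- def check_desc_dampener_dynamic(level):
--     skip_point = None
--     for i in range(len(level) - 1):
--         if i == skip_point:
--             pass
--         if not (safely_desc(level[i], level[i+1])):
--             if (skip_point is None) and i < (len(level)-2): # if our skip is available and there's a place to skip to
--                 skip_point = i + 1 # no more skips now
--                 if (safely_desc(level[i], level[i+2])):
--                     pass
--                 else:
--                     return False
--
--             else: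
--                 return False # not safe, and no more skips
--     return True
-- ===== SOURCE B (Python) =====
-- def check_desc_dampener_dynamic(level):
--     n = len(level)
--     bad = [i for i in range(n - 1) if (level[i] - level[i + 1]) not in (1, 2, 3)]
--     if not bad:
--         return True
--     if len(bad) > 1:
--         return False
--     j = bad[0]
--     return j < n - 2 and (level[j] - level[j + 2]) in (1, 2, 3)
-- ===== Notes on version B (the rewrite author's own statement) =====
-- stated objective: simpler
-- what changed: Replaces A's early-returning state machine with a skip_point variable by first collecting the list of bad adjacency indices and then deciding from its length (0, 1, or more), checking the one-skip repair only in the single-bad case.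
import Mathlib
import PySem

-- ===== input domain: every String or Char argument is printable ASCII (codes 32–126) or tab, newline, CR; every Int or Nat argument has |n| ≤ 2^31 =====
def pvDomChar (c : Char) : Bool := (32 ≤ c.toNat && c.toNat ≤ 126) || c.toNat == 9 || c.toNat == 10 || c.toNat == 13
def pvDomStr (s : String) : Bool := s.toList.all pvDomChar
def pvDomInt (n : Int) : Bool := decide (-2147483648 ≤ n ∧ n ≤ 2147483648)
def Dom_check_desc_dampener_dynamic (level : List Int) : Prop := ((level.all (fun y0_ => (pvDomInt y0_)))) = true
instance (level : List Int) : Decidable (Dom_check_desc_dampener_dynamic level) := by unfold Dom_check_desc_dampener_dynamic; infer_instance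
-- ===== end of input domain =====

-- B replaces A's early-returning skip_point state machine with a collect-bad-indices-then-decide shape (objective: simpler).


-- ===== PORT A =====
-- safely_desc(a, b): (a - b) in [1, 2, 3]
def safelyDesc (a b : Int) : Bool := ([1, 2, 3] : List Int).contains (a - b)

-- the for-loop over range(len(level)-1) with early return; list indexing is by
-- List.getD (exact here: every index the loop reads is in range: i ≤ n-2, i+1 ≤ n-1,
-- and i+2 is read only under the guard i < n-2).
def cddLoopA (level : List Int) : List Nat → Option Nat → Bool
  | [], _ => true
  | i :: rest, skip =>
    if !(safelyDesc (level.getD i 0) (level.getD (i + 1) 0)) then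
      if skip.isNone && decide ((i : Int) < (level.length : Int) - 2) then
        if safelyDesc (level.getD i 0) (level.getD (i + 2) 0) then
          cddLoopA level rest (some (i + 1))
        else false
      else false
    else cddLoopA level rest skip

def check_desc_dampener_dynamic (level : List Int) : Bool :=
  cddLoopA level (List.range (level.length - 1)) none

-- ===== PORT B =====
def check_desc_dampener_dynamic_alt (level : List Int) : Bool :=
  let n := level.length
  let bad := (List.range (n - 1)).filter
    (fun i => !(([1, 2, 3] : List Int).contains (level.getD i 0 - level.getD (i + 1) 0)))
  match bad with
  | [] => true
  | [j] => decide ((j : Int) < (n : Int) - 2) &&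
           ([1, 2, 3] : List Int).contains (level.getD j 0 - level.getD (j + 2) 0)
  | _ => false

-- ===== PRECONDITION & SPEC =====
def Spec_check_desc_dampener_dynamic (level : List Int) (out : Bool) : Prop := out = check_desc_dampener_dynamic_alt level
instance (level : List Int) (out : Bool) : Decidable (Spec_check_desc_dampener_dynamic level out) := by unfold Spec_check_desc_dampener_dynamic; infer_instance

-- ===== CLAIM (what is proved, stated in full; the proofs are below) =====
def Claim_equal_check_desc_dampener_dynamic : Prop := ∀ (level : List Int), Dom_check_desc_dampener_dynamic level → Spec_check_desc_dampener_dynamic level (check_desc_dampener_dynamic level)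

-- ===== LEMMAS AND PROOFS =====

theorem cddLoopA_some (level : List Int) (k : Nat) :
    ∀ is : List Nat, cddLoopA level is (some k) =
      is.all (fun i => safelyDesc (level.getD i 0) (level.getD (i + 1) 0)) := by
  intro is
  induction is generalizing k with
  | nil => rfl
  | cons i rest ih =>
    cases h : safelyDesc (level.getD i 0) (level.getD (i + 1) 0) <;>
      simp_all [cddLoopA]

theorem cddLoopA_none (level : List Int) :
    ∀ is : List Nat, cddLoopA level is none =
      (match is.filter (fun i => !(safelyDesc (level.getD i 0) (level.getD (i + 1) 0))) with
       | [] => true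
       | [j] => decide ((j : Int) < (level.length : Int) - 2) &&
                safelyDesc (level.getD j 0) (level.getD (j + 2) 0)
       | _ => false) := by
  intro is
  induction is with
  | nil => rfl
  | cons i rest ih =>
    cases h : safelyDesc (level.getD i 0) (level.getD (i + 1) 0)
    · -- bad pair at i
      rw [cddLoopA, h]
      simp only [Bool.not_false, Option.isNone_none, Bool.true_and, List.filter_cons, h]
      cases hF : rest.filter (fun i => !(safelyDesc (level.getD i 0) (level.getD (i + 1) 0))) with
      | nil =>
        have hall : rest.all (fun i => safelyDesc (level.getD i 0) (level.getD (i + 1) 0)) = true := by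
          rw [List.all_eq_true]
          intro x hx
          have := List.filter_eq_nil_iff.mp hF x hx
          simpa using this
        simp only [List.getD_eq_getElem?_getD] at hall
        by_cases hg : ((i : Int) < (level.length : Int) - 2)
        · cases hs : safelyDesc (level[i]?.getD 0) (level[(i + 2)]?.getD 0) <;>
            simp [hg, hs, cddLoopA_some, hall]
        · simp [hg]
      | cons j rest' =>
        have hnall : rest.all (fun i => safelyDesc (level.getD i 0) (level.getD (i + 1) 0)) = false := by
          rcases List.mem_filter.mp (hF ▸ List.mem_cons_self ..) with ⟨hjm, hjb⟩
          rw [List.all_eq_false]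
          exact ⟨j, hjm, by simpa using hjb⟩
        simp only [List.getD_eq_getElem?_getD] at hnall
        by_cases hg : ((i : Int) < (level.length : Int) - 2)
        · cases hs : safelyDesc (level[i]?.getD 0) (level[(i + 2)]?.getD 0) <;>
            simp [hg, hs, cddLoopA_some, hnall]
        · simp [hg]
    · -- good pair at i
      rw [cddLoopA, h]
      simp only [Bool.not_true, List.filter_cons, h]
      simpa using ih

-- ===== VERDICT (by name: the statement is the Claim_ definition above) =====
theorem check_desc_dampener_dynamic_spec : Claim_equal_check_desc_dampener_dynamic := by
  intro level _
  unfold Spec_check_desc_dampener_dynamic check_desc_dampener_dynamic check_desc_dampener_dynamic_alt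
  rw [cddLoopA_none]
  simp only [safelyDesc]
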